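-- pv_equiv track=rewrite | github.com/FranciscoRomao/weaver | atomique/plot/20_sensitivity/dev_ablation_plot.py | get_n_row_col
-- ===== SOURCE A (Python) =====
-- def get_n_row_col(n_qubits):
--     n_rows = []
--     n_cols = []
--     for i in range(n_qubits, 0, -1):
--         n_col = int(n_qubits // i)
--         if len(n_cols) == 0 or n_col != n_cols[-1]:
--             n_rows.append(i)
--             n_cols.append(n_col)
--     return n_rows, n_cols
-- ===== SOURCE B (Python) =====
-- def get_n_row_col(n_qubits):
--     # Divisor-block enumeration: jump directly to the largest i of each
--     # distinct quotient block instead of scanning every i from n_qubits to 1.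
--     n_rows = []
--     n_cols = []
--     i = n_qubits
--     while i >= 1:
--         q = n_qubits // i
--         n_rows.append(i)
--         n_cols.append(q)
--         i = n_qubits // (q + 1)
--     return n_rows, n_cols
-- ===== Notes on version B (the rewrite author's own statement) =====
-- stated objective: faster
-- what changed: Instead of scanning every i from n_qubits down to 1 and appending when the quotient changes, B jumps directly from each block head i to the head of the next quotient block via i = n_qubits // (n_qubits // i + 1), visiting only the distinct quotient values.
import Mathlib
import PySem

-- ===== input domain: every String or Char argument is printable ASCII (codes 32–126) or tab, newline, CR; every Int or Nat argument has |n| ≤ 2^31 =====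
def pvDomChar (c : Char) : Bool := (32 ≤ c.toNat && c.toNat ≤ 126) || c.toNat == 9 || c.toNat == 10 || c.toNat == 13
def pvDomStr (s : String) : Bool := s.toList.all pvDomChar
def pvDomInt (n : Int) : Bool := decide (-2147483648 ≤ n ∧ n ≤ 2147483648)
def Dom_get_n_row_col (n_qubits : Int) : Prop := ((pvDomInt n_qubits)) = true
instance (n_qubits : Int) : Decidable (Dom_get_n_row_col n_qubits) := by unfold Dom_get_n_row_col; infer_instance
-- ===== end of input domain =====

-- B replaces A's O(n) scan over every i from n_qubits down to 1 by the
-- O(√n) divisor-block jump i ← n_qubits // (q + 1) over distinct quotients.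

-- ===== PORT A =====
-- one iteration of A's for-loop body, state = (n_rows, n_cols)
def pvStepA (n_qubits : Int) (st : List Int × List Int) (i : Int) : List Int × List Int :=
  let n_col := PySem.Int.floordiv n_qubits i
  if st.2 = [] ∨ PySem.List.pyGet? st.2 (-1) ≠ some n_col then
    (st.1 ++ [i], st.2 ++ [n_col])
  else st

def get_n_row_col (n_qubits : Int) : List Int × List Int :=
  (PySem.List.pyRange n_qubits 0 (-1)).foldl (pvStepA n_qubits) ([], [])

-- ===== PORT B =====
-- characterisation of floor division by a positive divisor (used for termination below)
theorem pvFdivChar (n i : Int) (hi : 0 < i) :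
    PySem.Int.floordiv n i * i ≤ n ∧ n < (PySem.Int.floordiv n i + 1) * i :=
  (PySem.Int.floordiv_eq_iff_of_pos hi).mp rfl

-- the jump target strictly decreases (guard of the while loop; 1 ≤ i ≤ n on every reachable state)
theorem pvNext_lt (n i : Int) (h1 : 1 ≤ i) (h2 : i ≤ n) :
    PySem.Int.floordiv n (PySem.Int.floordiv n i + 1) < i := by
  have hq : 0 ≤ PySem.Int.floordiv n i :=
    (PySem.Int.le_floordiv_iff_mul_le (by omega)).mpr (by omega)
  have hc := (pvFdivChar n i (by omega)).2
  exact (PySem.Int.floordiv_lt_iff_lt_mul (by omega)).mpr (by nlinarith)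

theorem pvNext_nonneg (n i : Int) (h1 : 1 ≤ i) (hin : i ≤ n) :
    0 ≤ PySem.Int.floordiv n (PySem.Int.floordiv n i + 1) := by
  have hq : 0 ≤ PySem.Int.floordiv n i :=
    (PySem.Int.le_floordiv_iff_mul_le (by omega)).mpr (by omega)
  exact (PySem.Int.le_floordiv_iff_mul_le (by omega)).mpr (by omega)

-- B's while loop; the conjunct i ≤ n_qubits is a totality guard only: it holds on
-- every state the Python loop reaches (initially i = n_qubits, and the jump decreases i)
def pvAltLoop (n_qubits i : Int) (n_rows n_cols : List Int) : List Int × List Int :=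
  if h : 1 ≤ i ∧ i ≤ n_qubits then
    let q := PySem.Int.floordiv n_qubits i
    pvAltLoop n_qubits (PySem.Int.floordiv n_qubits (q + 1)) (n_rows ++ [i]) (n_cols ++ [q])
  else (n_rows, n_cols)
termination_by i.toNat
decreasing_by
  have h1 := pvNext_lt n_qubits i h.1 h.2
  have h2 := pvNext_nonneg n_qubits i h.1 h.2
  omega

def get_n_row_col_alt (n_qubits : Int) : List Int × List Int :=
  pvAltLoop n_qubits n_qubits [] []

-- ===== PRECONDITION & SPEC =====
def Spec_get_n_row_col (n_qubits : Int) (out : List Int × List Int) : Prop := out = get_n_row_col_alt n_qubits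
instance (n_qubits : Int) (out : List Int × List Int) : Decidable (Spec_get_n_row_col n_qubits out) := by unfold Spec_get_n_row_col; infer_instance

-- ===== CLAIM (what is proved, stated in full; the proofs are below) =====
def Claim_equal_get_n_row_col : Prop := ∀ (n_qubits : Int), Dom_get_n_row_col n_qubits → Spec_get_n_row_col n_qubits (get_n_row_col n_qubits)

-- ===== LEMMAS AND PROOFS =====

-- every index in the current block has the same quotient
theorem pvSameBlock (n i k : Int) (h1 : 1 ≤ i) (h2 : i ≤ n)
    (hk1 : PySem.Int.floordiv n (PySem.Int.floordiv n i + 1) < k) (hk2 : k ≤ i) :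
    PySem.Int.floordiv n k = PySem.Int.floordiv n i := by
  set q := PySem.Int.floordiv n i with hqdef
  have hq : 0 ≤ q := (PySem.Int.le_floordiv_iff_mul_le (by omega)).mpr (by omega)
  have hnn := pvNext_nonneg n i h1 h2
  rw [show PySem.Int.floordiv n i = q from hqdef.symm] at hnn
  have hk0 : 0 < k := by omega
  have hci := pvFdivChar n i (by omega)
  have hub : n < k * (q + 1) := (PySem.Int.floordiv_lt_iff_lt_mul (by omega)).mp hk1
  refine (PySem.Int.floordiv_eq_iff_of_pos hk0).mpr ⟨?_, ?_⟩
  · nlinarith [hci.1]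
  · nlinarith

-- the last appended quotient is strictly below the quotient at the jump target
theorem pvNextQuot (n i : Int) (h1 : 1 ≤ i) (h2 : i ≤ n)
    (hpos : 1 ≤ PySem.Int.floordiv n (PySem.Int.floordiv n i + 1)) :
    PySem.Int.floordiv n i <
      PySem.Int.floordiv n (PySem.Int.floordiv n (PySem.Int.floordiv n i + 1)) := by
  set q := PySem.Int.floordiv n i with hqdef
  have hq : 0 ≤ q := (PySem.Int.le_floordiv_iff_mul_le (by omega)).mpr (by omega)
  have hc := (pvFdivChar n (q + 1) (by omega)).1
  have : q + 1 ≤ PySem.Int.floordiv n (PySem.Int.floordiv n (q + 1)) :=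
    (PySem.Int.le_floordiv_iff_mul_le (by omega)).mpr (by nlinarith)
  omega

-- A's loop does nothing while the quotient equals the last appended column
theorem pvSkip (n q m : Int) (hm : 0 ≤ m) : ∀ (d : Nat) (rows cols : List Int),
    PySem.List.pyGet? cols (-1) = some q →
    (∀ k, m < k → k ≤ m + (d : Int) → PySem.Int.floordiv n k = q) →
    (PySem.List.pyRange (m + (d : Int)) 0 (-1)).foldl (pvStepA n) (rows, cols)
      = (PySem.List.pyRange m 0 (-1)).foldl (pvStepA n) (rows, cols) := by
  intro d
  induction d with
  | zero => intro rows cols _ _; norm_num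
  | succ d ih =>
    intro rows cols hlast hblk
    rw [show (((d + 1 : Nat)) : Int) = (d : Int) + 1 by push_cast; ring]
    rw [show (((d + 1 : Nat)) : Int) = (d : Int) + 1 by push_cast; ring] at hblk
    have hcons : PySem.List.pyRange (m + ((d : Int) + 1)) 0 (-1)
        = (m + ((d : Int) + 1)) :: PySem.List.pyRange (m + (d : Int)) 0 (-1) := by
      have := PySem.List.pyRange_neg_one_cons (a := m + ((d : Int) + 1)) (b := 0) (by omega)
      simpa [show m + ((d : Int) + 1) - 1 = m + (d : Int) by ring] using this
    have hqk : PySem.Int.floordiv n (m + ((d : Int) + 1)) = q :=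
      hblk _ (by omega) (by omega)
    have hne : cols ≠ [] := by
      intro hc; rw [hc] at hlast; simp [PySem.List.pyGet?, PySem.List.pyIdx?] at hlast
    have hstep : pvStepA n (rows, cols) (m + ((d : Int) + 1)) = (rows, cols) := by
      simp only [pvStepA, hqk, hlast]
      simp [hne]
    rw [hcons]
    simp only [List.foldl_cons]
    rw [hstep]
    exact ih rows cols hlast (fun k hk1 hk2 => hblk k hk1 (by omega))

-- main invariant: from any state whose last column is strictly below n//i,
-- the rest of A's scan equals B's jump loop
theorem pvMain (n : Int) (hpos : 1 ≤ n) : ∀ (N : Nat) (i : Int), i.toNat ≤ N → 0 ≤ i → i ≤ n →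
    ∀ rows cols,
    (cols = [] ∨ ∃ q0, PySem.List.pyGet? cols (-1) = some q0 ∧ q0 < PySem.Int.floordiv n i) →
    (PySem.List.pyRange i 0 (-1)).foldl (pvStepA n) (rows, cols) = pvAltLoop n i rows cols := by
  intro N
  induction N with
  | zero =>
    intro i hN h0 hi rows cols _
    have : i = 0 := by omega
    subst this
    rw [PySem.List.pyRange_neg_one_eq_nil (by omega), pvAltLoop]
    simp
  | succ N ih =>
    intro i hN h0 hi rows cols hlast
    by_cases h1 : 1 ≤ i
    · set q := PySem.Int.floordiv n i with hqdef
      set nxt := PySem.Int.floordiv n (q + 1) with hnxtdef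
      have hnxt0 : 0 ≤ nxt := pvNext_nonneg n i h1 hi
      have hnxtlt : nxt < i := pvNext_lt n i h1 hi
      -- unfold one step of A at index i: it appends
      have hcons := PySem.List.pyRange_neg_one_cons (a := i) (b := 0) (by omega)
      have happend : pvStepA n (rows, cols) i = (rows ++ [i], cols ++ [q]) := by
        rcases hlast with hc | ⟨q0, hg, hlt⟩
        · simp [pvStepA, hc, ← hqdef]
        · simp only [pvStepA]
          rw [if_pos]
          right
          rw [hg]
          intro hcontra
          rw [← hqdef] at hcontra
          exact absurd (Option.some.inj hcontra) (by omega)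
      rw [hcons]
      simp only [List.foldl_cons]
      rw [happend]
      -- skip the rest of the block: i-1 down to nxt
      have hlast' : PySem.List.pyGet? (cols ++ [q]) (-1) = some q :=
        PySem.List.pyGet?_neg_one_append_singleton cols q
      have hskip := pvSkip n q nxt hnxt0 (i - 1 - nxt).toNat (rows ++ [i]) (cols ++ [q]) hlast'
        (fun k hk1 hk2 => pvSameBlock n i k h1 hi hk1 (by omega))
      rw [show nxt + ((i - 1 - nxt).toNat : Int) = i - 1 by omega] at hskip
      rw [hskip]
      -- recurse at the jump target
      by_cases hp : 1 ≤ nxt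
      · have hp' : 1 ≤ PySem.Int.floordiv n (PySem.Int.floordiv n i + 1) := by
          rw [← hqdef, ← hnxtdef]; exact hp
        have hq2 := pvNextQuot n i h1 hi hp'
        rw [← hqdef, ← hnxtdef] at hq2
        have hrec := ih nxt (by omega) (by omega) (by omega) (rows ++ [i]) (cols ++ [q])
          (Or.inr ⟨q, hlast', hq2⟩)
        rw [hrec]
        conv_rhs => rw [pvAltLoop]
        rw [dif_pos ⟨h1, hi⟩]
      · have hz : nxt = 0 := by omega
        rw [hz, PySem.List.pyRange_neg_one_eq_nil (by omega)]
        conv_rhs => rw [pvAltLoop]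
        rw [dif_pos ⟨h1, hi⟩]
        rw [pvAltLoop]
        rw [dif_neg (by rw [← hqdef, ← hnxtdef]; omega)]
        simp [hqdef]
    · have : i = 0 := by omega
      subst this
      rw [PySem.List.pyRange_neg_one_eq_nil (by omega), pvAltLoop]
      simp

-- ===== VERDICT (by name: the statement is the Claim_ definition above) =====
theorem get_n_row_col_spec : Claim_equal_get_n_row_col := by
  intro n _
  unfold Spec_get_n_row_col get_n_row_col get_n_row_col_alt
  by_cases hn : 1 ≤ n
  · exact pvMain n hn n.toNat n le_rfl (by omega) le_rfl [] [] (Or.inl rfl)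
  · rw [PySem.List.pyRange_neg_one_eq_nil (by omega), pvAltLoop]
    rw [dif_neg (by omega)]
    simp
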